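-- pv_equiv track=rewrite | github.com/bossm0n5t3r/BOJ | UNSOLVED/1596/solution.py | ys_func
-- ===== SOURCE A (Python) =====
-- def ys_func(basis, n):
--     tmp = str(n)
--     if len(tmp) == 1 or len(tmp) == 2:
--         return n
--     result = ""
--     for i in range(len(tmp) - 1):
--         result += str(abs(int(tmp[i]) - int(tmp[i + 1])))
--     if int(result) not in basis and len(result) > 2:
--         return ys_func(basis, int(result))
--     return int(result)
-- ===== SOURCE B (Python) =====
-- def ys_func(basis, n):
--     # Iterative re-implementation: while-loop instead of tail recursion,
--     # zip/join comprehension instead of an index loop with string +=.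
--     while True:
--         tmp = str(n)
--         if len(tmp) <= 2:
--             return n
--         result = "".join(str(abs(int(a) - int(b))) for a, b in zip(tmp, tmp[1:]))
--         r = int(result)
--         if r in basis or len(result) <= 2:
--             return r
--         n = r
-- ===== Notes on version B (the rewrite author's own statement) =====
-- stated objective: idiomatic
-- what changed: The tail recursion with an index-based string-building loop ('result += str(abs(int(tmp[i]) - int(tmp[i+1])))' over range(len(tmp)-1)) is rewritten as a while-loop over the current number with the adjacent-difference string built by ''.join over zip(tmp, tmp[1:]), and the continue/return condition inverted.
import Mathlib
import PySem

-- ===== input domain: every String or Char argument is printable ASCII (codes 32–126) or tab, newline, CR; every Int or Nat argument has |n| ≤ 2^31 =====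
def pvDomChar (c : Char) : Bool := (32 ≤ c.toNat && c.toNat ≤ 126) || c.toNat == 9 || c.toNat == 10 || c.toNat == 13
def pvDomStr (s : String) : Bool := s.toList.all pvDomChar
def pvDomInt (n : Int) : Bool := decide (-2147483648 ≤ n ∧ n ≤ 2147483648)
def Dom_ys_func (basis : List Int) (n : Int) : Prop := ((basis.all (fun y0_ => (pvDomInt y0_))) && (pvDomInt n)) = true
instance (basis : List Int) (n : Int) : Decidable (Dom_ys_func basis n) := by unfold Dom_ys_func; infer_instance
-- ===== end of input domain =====

-- B rewrites A's tail recursion as a while-loop and builds the adjacent-difference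
-- string with ''.join over zip(tmp, tmp[1:]) instead of an index loop with `+=` (idiomatic objective).

-- ===== PORT A =====
-- the loop `for i in range(len(tmp) - 1): result += str(abs(int(tmp[i]) - int(tmp[i+1])))`
def ysA_result (tmp : List Char) : List Char :=
  (PySem.List.pyRange 0 (PySem.List.len tmp - 1) 1).foldl
    (fun acc i =>
      acc ++ PySem.Int.toChars
        (|(((PySem.List.pyGet? tmp i).bind (fun c => PySem.Int.ofChars? [c])).getD 0) -
          (((PySem.List.pyGet? tmp (i + 1)).bind (fun c => PySem.Int.ofChars? [c])).getD 0)|)) []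

-- the recursion of ys_func; the Nat argument is a fuel guard making the recursion total
-- (ample for every input admitted by Dom_/Pre_; the recursion strictly shrinks the digit count)
def ysA_go : Nat → List Int → Int → Int
  | 0, _, _ => 0
  | fuel+1, basis, n =>
    let tmp := PySem.Int.toChars n
    if PySem.List.len tmp = 1 ∨ PySem.List.len tmp = 2 then n
    else
      let result := ysA_result tmp
      if ¬ ((PySem.Int.ofChars? result).getD 0 ∈ basis) ∧ 2 < PySem.List.len result then
        ysA_go fuel basis ((PySem.Int.ofChars? result).getD 0)
      else (PySem.Int.ofChars? result).getD 0

def ys_func (basis : List Int) (n : Int) : Int := ysA_go 64 basis n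

-- ===== PORT B =====
-- str(abs(int(a) - int(b))) for one pair (a, b) of zip(tmp, tmp[1:])
def ysB_pairStr (p : Char × Char) : List Char :=
  PySem.Int.toChars (|((PySem.Int.ofChars? [p.1]).getD 0) - ((PySem.Int.ofChars? [p.2]).getD 0)|)

-- the while-loop of Source B; the Nat argument is the same fuel guard as in port A
def ysB_loop : Nat → List Int → Int → Int
  | 0, _, _ => 0
  | fuel+1, basis, n =>
    let tmp := PySem.Int.toChars n
    if PySem.List.len tmp ≤ 2 then n
    else
      let result := ((tmp.zip (PySem.List.slice tmp (some 1) none)).map ysB_pairStr).flatten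
      let r := (PySem.Int.ofChars? result).getD 0
      if r ∈ basis ∨ PySem.List.len result ≤ 2 then r
      else ysB_loop fuel basis r

def ys_func_alt (basis : List Int) (n : Int) : Int := ysB_loop 64 basis n

-- ===== PRECONDITION & SPEC =====
-- A raises ValueError (int('-')) exactly when str(n) has three or more characters and starts
-- with '-', i.e. when n ≤ -10; Pre_ excludes those inputs and nothing else.
def Pre_ys_func (basis : List Int) (n : Int) : Prop := -10 < n
instance (basis : List Int) (n : Int) : Decidable (Pre_ys_func basis n) := by unfold Pre_ys_func; infer_instance
def pvWitness_ys_func : List Int × Int := ([3], 5)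

def Spec_ys_func (basis : List Int) (n : Int) (out : Int) : Prop := out = ys_func_alt basis n
instance (basis : List Int) (n : Int) (out : Int) : Decidable (Spec_ys_func basis n out) := by unfold Spec_ys_func; infer_instance

-- ===== CLAIM (what is proved, stated in full; the proofs are below) =====
def Claim_equal_ys_func : Prop := ∀ (basis : List Int) (n : Int), Dom_ys_func basis n → Pre_ys_func basis n → Spec_ys_func basis n (ys_func basis n)

-- ===== LEMMAS AND PROOFS =====

-- Nat.toDigitsCore never shortens its accumulator
theorem toDigitsCore_len_le (b : Nat) : ∀ (fuel n : Nat) (ds : List Char),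
    ds.length ≤ (Nat.toDigitsCore b fuel n ds).length := by
  intro fuel
  induction fuel with
  | zero => intro n ds; simp [Nat.toDigitsCore]
  | succ fuel ih =>
    intro n ds
    simp only [Nat.toDigitsCore]
    split
    · simp
    · calc ds.length ≤ (Nat.digitChar (n % b) :: ds).length := by simp
        _ ≤ _ := ih _ _

theorem toDigits_ne_nil (b n : Nat) : Nat.toDigits b n ≠ [] := by
  have h : 0 < (Nat.toDigits b n).length := by
    simp only [Nat.toDigits, Nat.toDigitsCore]
    split
    · simp
    · calc 0 < (Nat.digitChar (n % b) :: []).length := by simp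
        _ ≤ _ := toDigitsCore_len_le b n (n / b) _
  exact List.ne_nil_of_length_pos h

-- str(n) is never the empty string
theorem toChars_ne_nil (n : Int) : PySem.Int.toChars n ≠ [] := by
  unfold PySem.Int.toChars
  split
  · simp
  · exact toDigits_ne_nil _ _

-- A's index loop and B's zip/join build the same adjacent-difference string
theorem result_eq (tmp : List Char) :
    ysA_result tmp = ((tmp.zip (PySem.List.slice tmp (some 1) none)).map ysB_pairStr).flatten := by
  unfold ysA_result
  rw [PySem.List.foldl_append_eq_flatMap, List.nil_append, PySem.List.slice_from_one,
      List.flatMap_def, PySem.List.pyRange_one, List.map_map]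
  congr 1
  apply List.ext_getElem
  · simp [PySem.List.len, List.length_zip]
  · intro k hk1 hk2
    simp only [List.getElem_map, List.getElem_range, List.getElem_zip, Function.comp_apply]
    have hlen : k < tmp.length - 1 := by
      simp at hk1; omega
    have h1 : (0 : Int) + (k:Int) = ((k:Nat):Int) := by ring
    rw [h1]
    have h2 : ((k:Nat):Int) + 1 = (((k+1:Nat)):Int) := by push_cast; ring
    rw [h2]
    rw [PySem.List.pyGet?_natCast, PySem.List.pyGet?_natCast]
    rw [List.getElem?_eq_getElem (by omega), List.getElem?_eq_getElem (by omega)]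
    simp [ysB_pairStr, List.getElem_tail]

-- A's fueled recursion equals B's fueled loop, step for step
theorem go_eq_loop : ∀ (fuel : Nat) (basis : List Int) (n : Int),
    ysA_go fuel basis n = ysB_loop fuel basis n := by
  intro fuel
  induction fuel with
  | zero => intro basis n; rfl
  | succ fuel ih =>
    intro basis n
    simp only [ysA_go, ysB_loop, PySem.List.len_eq]
    have hpos : 0 < (PySem.Int.toChars n).length := List.length_pos_of_ne_nil (toChars_ne_nil n)
    by_cases hc : (PySem.Int.toChars n).length ≤ 2
    · rw [if_pos (by omega : ((PySem.Int.toChars n).length : Int) = 1 ∨ ((PySem.Int.toChars n).length : Int) = 2),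
          if_pos (by omega : ((PySem.Int.toChars n).length : Int) ≤ 2)]
    · rw [if_neg (by omega : ¬(((PySem.Int.toChars n).length : Int) = 1 ∨ ((PySem.Int.toChars n).length : Int) = 2)),
          if_neg (by omega : ¬((PySem.Int.toChars n).length : Int) ≤ 2)]
      rw [result_eq]
      set result := (((PySem.Int.toChars n).zip
        (PySem.List.slice (PySem.Int.toChars n) (some 1) none)).map ysB_pairStr).flatten with hres
      set r := (PySem.Int.ofChars? result).getD 0 with hr
      have hiff : (r ∈ basis ∨ (result.length : Int) ≤ 2) ↔
          ¬(¬ r ∈ basis ∧ 2 < (result.length : Int)) := by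
        constructor
        · rintro (h | h) ⟨h1, h2⟩
          · exact h1 h
          · omega
        · intro h
          push Not at h
          by_cases hm : r ∈ basis
          · exact Or.inl hm
          · exact Or.inr (by have := h hm; omega)
      by_cases hA2 : ¬ r ∈ basis ∧ 2 < (result.length : Int)
      · rw [if_pos hA2, if_neg (by rw [hiff]; exact not_not_intro hA2)]
        exact ih basis r
      · rw [if_neg hA2, if_pos (hiff.mpr hA2)]

-- ===== VERDICT (by name: the statement is the Claim_ definition above) =====
theorem ys_func_spec : Claim_equal_ys_func := by
  intro basis n _ _
  unfold Spec_ys_func ys_func ys_func_alt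
  exact go_eq_loop 64 basis n
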